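-- pv_equiv track=rewrite | github.com/pbielak/aoc2021 | day15/main.py | extend_tile_grid
-- ===== SOURCE A (Python) =====
-- from copy import deepcopy
-- from typing import Dict, List, Tuple
--
-- Data = List[List[int]]
--
-- def extend_tile_grid(data: Data, final_size: int = 5) -> Data:
--     data = deepcopy(data)
--
--     # Extend to the right
--     for row in data:
--         row.extend([
--             value
--             for delta in range(1, final_size)
--             for value in increment_row_values(row, delta)
--         ])
--
--     # Extend below
--     below_rows = []
--
--     for delta in range(1, final_size):
--         for row in data:
--             below_rows.append(increment_row_values(row, delta))
--
--     data.extend(below_rows)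
--
--     return data
--
-- def increment_row_values(row: List[int], delta: int) -> List[int]:
--     def _increment(value: int) -> int:
--         new_value = value + delta
--
--         if new_value > 9:
--             new_value -= 9
--
--         return new_value
--
--     return [_increment(v) for v in row]
-- ===== SOURCE B (Python) =====
-- def _shift(v, d):
--     # shift a base value by tile offset d, wrapping once past 9 (no-op for d == 0)
--     if d:
--         v += d
--         if v > 9:
--             v -= 9
--     return v
--
-- def extend_tile_grid(data, final_size=5):
--     # Flat index-arithmetic construction: output row J comes from base row J % r in
--     # vertical tile J // r; output column I comes from base column I % c in horizontal
--     # tile I // c.  (The base copy is always present, so there are max(final_size, 1) tiles.)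
--     tiles = max(final_size, 1)
--     r = len(data)
--     out = []
--     for J in range(r * tiles):
--         base = data[J % r]
--         c = len(base)
--         row = []
--         for I in range(c * tiles):
--             row.append(_shift(_shift(base[I % c], I // c), J // r))
--         out.append(row)
--     return out
-- ===== Notes on version B (the rewrite author's own statement) =====
-- stated objective: alternative
-- what changed: Replaces A's deepcopy + two-phase in-place construction (extend every row rightwards with per-delta shifted copies, then append shifted row layers below) with a flat index-arithmetic build: one loop over output row indices J and one over output column indices I, locating the source cell by divmod (J % r, I % c) and shifting it by the tile coordinates (I // c, J // r).
import Mathlib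
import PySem

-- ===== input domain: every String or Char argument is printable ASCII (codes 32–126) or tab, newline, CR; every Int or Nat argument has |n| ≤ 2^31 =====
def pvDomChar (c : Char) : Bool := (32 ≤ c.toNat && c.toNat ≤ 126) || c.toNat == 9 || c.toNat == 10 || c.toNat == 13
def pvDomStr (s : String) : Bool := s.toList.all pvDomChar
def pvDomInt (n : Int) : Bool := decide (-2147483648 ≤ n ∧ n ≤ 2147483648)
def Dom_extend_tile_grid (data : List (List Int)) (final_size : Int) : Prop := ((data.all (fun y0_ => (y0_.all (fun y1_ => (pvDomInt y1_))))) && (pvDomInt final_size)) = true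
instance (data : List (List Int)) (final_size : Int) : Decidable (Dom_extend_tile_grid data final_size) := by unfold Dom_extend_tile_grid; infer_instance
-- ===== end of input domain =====

-- B replaces A's deepcopy + two-phase mutation (extend each row rightwards, then append
-- shifted layers below) with a flat index-arithmetic construction: one loop over output
-- row indices with divmod addressing into the base grid; return values proved equal.

-- ===== PORT A =====
-- helper: _increment inside increment_row_values
def pvInc (delta v : Int) : Int :=
  let new_value := v + delta
  if new_value > 9 then new_value - 9 else new_value

def increment_row_values (row : List Int) (delta : Int) : List Int :=
  row.map (fun v => pvInc delta v)

def extend_tile_grid (data : List (List Int)) (final_size : Int) : List (List Int) :=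
  -- Extend to the right (row.extend of the comprehension over delta in range(1, final_size))
  let data2 := data.map (fun row =>
    row ++ (PySem.List.pyRange 1 final_size 1).flatMap (fun delta => increment_row_values row delta))
  -- Extend below
  let below_rows := (PySem.List.pyRange 1 final_size 1).flatMap (fun delta =>
    data2.map (fun row => increment_row_values row delta))
  data2 ++ below_rows

-- ===== PORT B =====
-- helper: _shift in Source B ('if d:' is d ≠ 0)
def pyShift (v d : Int) : Int :=
  if d ≠ 0 then (if v + d > 9 then v + d - 9 else v + d) else v

def extend_tile_grid_alt (data : List (List Int)) (final_size : Int) : List (List Int) :=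
  let tiles := max final_size 1
  let r : Int := (data.length : Int)
  (PySem.List.pyRange 0 (r * tiles) 1).map (fun J =>
    let base := PySem.List.pyGetD data (PySem.Int.mod J r) []
    let c : Int := (base.length : Int)
    (PySem.List.pyRange 0 (c * tiles) 1).map (fun I =>
      pyShift (pyShift (PySem.List.pyGetD base (PySem.Int.mod I c) 0) (PySem.Int.floordiv I c))
        (PySem.Int.floordiv J r)))

-- ===== PRECONDITION & SPEC =====
def Spec_extend_tile_grid (data : List (List Int)) (final_size : Int) (out : List (List Int)) : Prop := out = extend_tile_grid_alt data final_size
instance (data : List (List Int)) (final_size : Int) (out : List (List Int)) : Decidable (Spec_extend_tile_grid data final_size out) := by unfold Spec_extend_tile_grid; infer_instance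

-- ===== CLAIM (what is proved, stated in full; the proofs are below) =====
def Claim_equal_extend_tile_grid : Prop := ∀ (data : List (List Int)) (final_size : Int), Dom_extend_tile_grid data final_size → Spec_extend_tile_grid data final_size (extend_tile_grid data final_size)

-- ===== LEMMAS AND PROOFS =====

-- common normal form both ports are reduced to: a t×t arrangement of shifted copies of data
def pvCanon (data : List (List Int)) (t : Nat) : List (List Int) :=
  (List.range t).flatMap (fun q : Nat => data.map (fun row =>
    (List.range t).flatMap (fun p : Nat => row.map (fun v => pyShift (pyShift v (p : Int)) (q : Int)))))

theorem pv_range_cast (n : Nat) :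
    PySem.List.pyRange 0 (n : Int) 1 = (List.range n).map (fun k : Nat => (k : Int)) := by
  rw [PySem.List.pyRange_one]
  simp only [Int.sub_zero, Int.toNat_natCast]
  exact List.map_congr_left (fun k _ => by simp)

theorem pv_flat_block {α : Type} (t r : Nat) (F : Nat → α) :
    (List.range (t * r)).map F
      = (List.range t).flatMap (fun q => (List.range r).map (fun b => F (q * r + b))) := by
  induction t with
  | zero => simp
  | succ t ih =>
    rw [Nat.succ_mul, List.range_add, List.map_append, ih, List.range_succ, List.flatMap_append]
    simp [List.map_map, Function.comp, Nat.add_comm]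

theorem pv_map_index {α β : Type} (xs : List β) (d : β) (f : β → α) :
    (List.range xs.length).map (fun i : Nat => f (PySem.List.pyGetD xs (i : Int) d)) = xs.map f := by
  apply List.ext_getElem (by simp)
  intro i h1 h2
  rw [List.getElem_map, List.getElem_map, List.getElem_range, PySem.List.pyGetD_natCast]
  rw [List.getD_eq_getElem?_getD, List.getElem?_eq_getElem (by simpa using h2)]
  rfl

theorem pv_mod (q b r : Nat) (hb : b < r) :
    PySem.Int.mod ((q * r + b : Nat) : Int) ((r : Nat) : Int) = (b : Int) := by
  rw [PySem.Int.mod_natCast]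
  norm_num [Nat.mul_add_mod, Nat.mod_eq_of_lt hb]

theorem pv_div (q b r : Nat) (hb : b < r) :
    PySem.Int.floordiv ((q * r + b : Nat) : Int) ((r : Nat) : Int) = (q : Int) := by
  rw [PySem.Int.floordiv_natCast, Nat.mul_comm q r, Nat.mul_add_div (by omega), Nat.div_eq_of_lt hb]
  simp

-- one flat pass of B: a pyRange over len(xs)*t flat indices with divmod addressing is
-- t stacked blocks, each a map over xs
theorem pv_tile {α β : Type} (xs : List β) (d : β) (t : Nat) (f : Int → β → α) :
    (PySem.List.pyRange 0 ((xs.length : Int) * (t : Int)) 1).map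
        (fun J => f (PySem.Int.floordiv J (xs.length : Int))
                    (PySem.List.pyGetD xs (PySem.Int.mod J (xs.length : Int)) d))
      = (List.range t).flatMap (fun q : Nat => xs.map (fun x => f (q : Int) x)) := by
  have hcast : ((xs.length : Int) * (t : Int)) = ((t * xs.length : Nat) : Int) := by push_cast; ring
  rw [hcast, pv_range_cast, List.map_map, pv_flat_block]
  refine List.flatMap_congr (fun q hq => ?_)
  calc (List.range xs.length).map (fun b =>
          f (PySem.Int.floordiv ((q * xs.length + b : Nat) : Int) (xs.length : Int))
            (PySem.List.pyGetD xs (PySem.Int.mod ((q * xs.length + b : Nat) : Int) (xs.length : Int)) d))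
      = (List.range xs.length).map (fun b : Nat => f (q : Int) (PySem.List.pyGetD xs (b : Int) d)) := by
        refine List.map_congr_left (fun b hb => ?_)
        rw [pv_div q b _ (List.mem_range.mp hb), pv_mod q b _ (List.mem_range.mp hb)]
    _ = xs.map (fun x => f (q : Int) x) := pv_map_index xs d (fun x => f (q : Int) x)

theorem pyShift_zero (v : Int) : pyShift v 0 = v := rfl

theorem pyShift_succ (v : Int) (k : Nat) : pyShift v ((k + 1 : Nat) : Int) = pvInc (1 + (k : Int)) v := by
  have h : ((k + 1 : Nat) : Int) = 1 + (k : Int) := by push_cast; ring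
  rw [h]
  unfold pyShift pvInc
  rw [if_pos (by omega : (1 + (k : Int)) ≠ 0)]

-- B's port reduces to the normal form
theorem pv_alt_canon (data : List (List Int)) (fs : Int) :
    extend_tile_grid_alt data fs = pvCanon data (max fs 1).toNat := by
  have ht : max fs 1 = (((max fs 1).toNat : Nat) : Int) := (Int.toNat_of_nonneg (by omega)).symm
  unfold extend_tile_grid_alt pvCanon
  rw [ht]
  rw [pv_tile data ([] : List Int) (max fs 1).toNat
      (fun tj base => (PySem.List.pyRange 0 ((base.length : Int) * (((max fs 1).toNat : Nat) : Int)) 1).map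
        (fun I => pyShift (pyShift (PySem.List.pyGetD base (PySem.Int.mod I (base.length : Int)) 0)
          (PySem.Int.floordiv I (base.length : Int))) tj))]
  refine List.flatMap_congr (fun q _ => List.map_congr_left (fun row _ => ?_))
  exact pv_tile row 0 (max fs 1).toNat (fun ti v => pyShift (pyShift v ti) (q : Int))

-- A's rightward row extension, in normal form
theorem pv_ext_canon (row : List Int) (fs : Int) :
    row ++ (PySem.List.pyRange 1 fs 1).flatMap (fun delta => increment_row_values row delta)
      = (List.range (max fs 1).toNat).flatMap (fun p : Nat => row.map (fun v => pyShift v (p : Int))) := by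
  have hT : (max fs 1).toNat = ((fs - 1).toNat) + 1 := by omega
  rw [hT, List.range_succ_eq_map, List.flatMap_cons]
  congr 1
  · simp [pyShift_zero]
  · rw [PySem.List.pyRange_one, List.flatMap_map, List.flatMap_map]
    refine List.flatMap_congr (fun k _ => ?_)
    simp only [increment_row_values]
    exact (List.map_congr_left (fun v _ => (pyShift_succ v k))).symm

-- A's port reduces to the same normal form
theorem pv_a_canon (data : List (List Int)) (fs : Int) :
    extend_tile_grid data fs = pvCanon data (max fs 1).toNat := by
  have hT : (max fs 1).toNat = ((fs - 1).toNat) + 1 := by omega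
  have hdata2 : data.map (fun row =>
        row ++ (PySem.List.pyRange 1 fs 1).flatMap (fun delta => increment_row_values row delta))
      = data.map (fun row => (List.range ((fs - 1).toNat + 1)).flatMap
          (fun p : Nat => row.map (fun v => pyShift v (p : Int)))) :=
    List.map_congr_left (fun row _ => by rw [pv_ext_canon row fs, hT])
  unfold extend_tile_grid pvCanon
  dsimp only
  rw [hdata2, hT, List.range_succ_eq_map]
  conv_rhs => rw [List.flatMap_cons]
  -- layer q = 0 (the rightward-extended rows) is closed by congr (pyShift _ 0 reduces);
  -- the remaining goal is the rows appended below, layers q = 1 .. t-1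
  congr 1
  rw [PySem.List.pyRange_one, List.flatMap_map, List.flatMap_map]
  refine List.flatMap_congr (fun k _ => ?_)
  rw [List.map_map]
  refine List.map_congr_left (fun row _ => ?_)
  simp only [Function.comp, increment_row_values]
  rw [List.map_flatMap]
  refine List.flatMap_congr (fun p _ => ?_)
  rw [List.map_map]
  refine List.map_congr_left (fun v _ => ?_)
  exact (pyShift_succ (pyShift v (p : Int)) k).symm

-- ===== VERDICT (by name: the statement is the Claim_ definition above) =====
theorem extend_tile_grid_spec : Claim_equal_extend_tile_grid := by
  intro data fs _
  show extend_tile_grid data fs = extend_tile_grid_alt data fs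
  rw [pv_a_canon, pv_alt_canon]
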